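-- pv_equiv track=rewrite | github.com/Hana-Perman/Arnoldova-macka | skrij_sporočilo.py | identiteta_optimal
-- ===== SOURCE A (Python) =====
-- import copy
--
-- def multiply_matrices(A, B):
--     """
--     Funkcija za množenje dveh matrik.
--     """
--     # Ustvarimo prazno matriko za rezultat
--     result = [[0 for _ in range(2)] for _ in range(2)]
--     # Izvedemo množenje matrik
--     for i in range(2):
--         for j in range(2):
--             for k in range(2):
--                 result[i][j] += A[i][k] * B[k][j]
--
--     return result
--
-- def modul(A, n):
--     """ta funkcija potencira matriko in rezultate zračuna po modulu stranice mreže"""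
--     m_A=[[0,0],[0,0]]
--     m_A[0][0]= A[0][0] % n
--     m_A[1][0] = A[1][0] % n
--     m_A[0][1]= A[0][1] % n
--     m_A[1][1]= A[1][1] % n
--     return m_A
--
-- def identiteta_optimal(n, A):
--     B = copy.deepcopy(A)
--     i_A = [[1, 0], [0, 1]]
--     m_A = modul(A,n)
--     števec = 1
--
--     while True:
--         if m_A == i_A:
--             return števec
--         else:
--             m_A= modul(multiply_matrices(m_A, A),n)
--
--         števec += 1
-- ===== SOURCE B (Python) =====
-- def identiteta_optimal(n, A):
--     # Cayley-Hamilton: A^2 = t*A - det*I, so A^k = f_k*A + g_k*I with a scalar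
--     # recurrence mod n; we never form a matrix product.
--     a, b, c, d = A[0][0], A[0][1], A[1][0], A[1][1]
--     t = a + d
--     det = a * d - b * c
--     f, g = 1, 0
--     k = 1
--     while True:
--         if (f * a + g) % n == 1 and (f * b) % n == 0 and (f * c) % n == 0 and (f * d + g) % n == 1:
--             return k
--         f, g = (t * f + g) % n, (-det * f) % n
--         k += 1
-- ===== Notes on version B (the rewrite author's own statement) =====
-- stated objective: alternative
-- what changed: B replaces A's per-step 2x2 matrix multiplication and matrix modular reduction by the Cayley-Hamilton scalar recurrence A^k = f_k*A + g_k*I mod n, iterating only two reduced scalars and testing four scalar congruences.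
import Mathlib
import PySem

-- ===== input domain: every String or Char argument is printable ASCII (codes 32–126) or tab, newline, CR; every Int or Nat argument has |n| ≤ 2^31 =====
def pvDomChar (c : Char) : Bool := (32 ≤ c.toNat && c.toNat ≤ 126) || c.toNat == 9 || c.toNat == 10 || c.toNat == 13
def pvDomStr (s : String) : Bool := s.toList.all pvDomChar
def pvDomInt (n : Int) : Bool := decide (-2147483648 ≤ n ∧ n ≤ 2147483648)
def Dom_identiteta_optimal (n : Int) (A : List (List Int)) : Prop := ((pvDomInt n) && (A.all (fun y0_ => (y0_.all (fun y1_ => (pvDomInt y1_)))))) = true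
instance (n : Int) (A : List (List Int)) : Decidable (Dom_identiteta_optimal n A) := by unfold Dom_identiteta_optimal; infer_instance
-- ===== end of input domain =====

-- B replaces A's per-step 2x2 matrix product + matrix reduction by the Cayley–Hamilton
-- scalar recurrence A^k ≡ f·A + g·I (mod n); proved to return the same count on Pre_.

-- ===== PORT A =====
-- A[i][j] for literal non-negative indices (Pre_ guarantees they are in range; A raises IndexError otherwise)
def pvAget (M : List (List Int)) (i j : Nat) : Int := (M.getD i []).getD j 0

-- multiply_matrices, with the two fixed range(2) loops written out entrywise
def pvMul (X Y : List (List Int)) : List (List Int) :=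
  [[pvAget X 0 0 * pvAget Y 0 0 + pvAget X 0 1 * pvAget Y 1 0,
    pvAget X 0 0 * pvAget Y 0 1 + pvAget X 0 1 * pvAget Y 1 1],
   [pvAget X 1 0 * pvAget Y 0 0 + pvAget X 1 1 * pvAget Y 1 0,
    pvAget X 1 0 * pvAget Y 0 1 + pvAget X 1 1 * pvAget Y 1 1]]

-- modul (the four assignments build exactly this list)
def pvModul (M : List (List Int)) (n : Int) : List (List Int) :=
  [[PySem.Int.mod (pvAget M 0 0) n, PySem.Int.mod (pvAget M 0 1) n],
   [PySem.Int.mod (pvAget M 1 0) n, PySem.Int.mod (pvAget M 1 1) n]]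

-- the while True loop; fuel only makes it total (on Pre_ the order is < n^4 + 1, so fuel never runs out)
def pvLoopA (n : Int) (A : List (List Int)) : Nat → List (List Int) → Int → Int
  | 0, _, _ => 0
  | fuel + 1, m, cnt =>
      if m = [[1, 0], [0, 1]] then cnt
      else pvLoopA n A fuel (pvModul (pvMul m A) n) (cnt + 1)

def identiteta_optimal (n : Int) (A : List (List Int)) : Int :=
  pvLoopA n A (n.toNat ^ 4 + 1) (pvModul A n) 1

-- ===== PORT B =====
-- the while True loop over the two scalars f, g; same totality fuel
def pvLoopB (n a b c d t det : Int) : Nat → Int → Int → Int → Int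
  | 0, _, _, _ => 0
  | fuel + 1, f, g, k =>
      if PySem.Int.mod (f * a + g) n = 1 ∧ PySem.Int.mod (f * b) n = 0 ∧
         PySem.Int.mod (f * c) n = 0 ∧ PySem.Int.mod (f * d + g) n = 1 then k
      else pvLoopB n a b c d t det fuel
             (PySem.Int.mod (t * f + g) n) (PySem.Int.mod (-det * f) n) (k + 1)

def identiteta_optimal_alt (n : Int) (A : List (List Int)) : Int :=
  let a := pvAget A 0 0
  let b := pvAget A 0 1
  let c := pvAget A 1 0
  let d := pvAget A 1 1
  pvLoopB n a b c d (a + d) (a * d - b * c) (n.toNat ^ 4 + 1) 1 0 1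

-- ===== PRECONDITION & SPEC =====
-- Exactly the inputs on which Python A returns: n ≥ 2 (for any other n the residue matrix can
-- never equal the identity, or n = 0 raises ZeroDivisionError), A has the accessed 2x2 shape
-- (otherwise IndexError), and det(A) invertible mod n (otherwise the loop never terminates).
def Pre_identiteta_optimal (n : Int) (A : List (List Int)) : Prop :=
  2 ≤ n ∧ 2 ≤ A.length ∧ 2 ≤ (A.getD 0 []).length ∧ 2 ≤ (A.getD 1 []).length ∧
  Int.gcd (pvAget A 0 0 * pvAget A 1 1 - pvAget A 0 1 * pvAget A 1 0) n = 1
instance (n : Int) (A : List (List Int)) : Decidable (Pre_identiteta_optimal n A) := by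
  unfold Pre_identiteta_optimal; infer_instance

def pvWitness_identiteta_optimal : Int × List (List Int) := (5, [[1, 1], [0, 1]])

def Spec_identiteta_optimal (n : Int) (A : List (List Int)) (out : Int) : Prop := out = identiteta_optimal_alt n A
instance (n : Int) (A : List (List Int)) (out : Int) : Decidable (Spec_identiteta_optimal n A out) := by unfold Spec_identiteta_optimal; infer_instance

-- ===== CLAIM (what is proved, stated in full; the proofs are below) =====
def Claim_equal_identiteta_optimal : Prop := ∀ (n : Int) (A : List (List Int)), Dom_identiteta_optimal n A → Pre_identiteta_optimal n A → Spec_identiteta_optimal n A (identiteta_optimal n A)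

-- ===== LEMMAS AND PROOFS =====

-- (x % n) is congruent to x mod n, pushed through a two-term linear combination
lemma pv_mod_mix (n p q u v : Int) : ((p % n) * u + (q % n) * v) % n = (p * u + q * v) % n := by
  have h1 : Int.ModEq n (p % n) p := Int.emod_emod_of_dvd p dvd_rfl
  have h2 : Int.ModEq n (q % n) q := Int.emod_emod_of_dvd q dvd_rfl
  exact (h1.mul_right u).add (h2.mul_right v)

lemma pv_key2 (n p q u v r w : Int) (h : p * u + q * v = r * w) :
    ((p % n) * u + (q % n) * v) % n = ((r % n) * w) % n := by
  have hr : Int.ModEq n (r % n) r := Int.emod_emod_of_dvd r dvd_rfl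
  have h2 : ((r % n) * w) % n = (r * w) % n := hr.mul_right w
  rw [pv_mod_mix, h2, h]

lemma pv_key1 (n p q u v r w s : Int) (h : p * u + q * v = r * w + s) :
    ((p % n) * u + (q % n) * v) % n = ((r % n) * w + (s % n)) % n := by
  have h2 : ((r % n) * w + (s % n)) % n = (r * w + s) % n := by
    have := pv_mod_mix n r s w 1
    simpa using this
  rw [pv_mod_mix, h2, h]

-- state correspondence: A's matrix after any number of steps is f·A + g·I reduced entrywise
lemma pv_loop_eq (n a b c d : Int) (hn : 0 < n) (A : List (List Int))
    (ha : pvAget A 0 0 = a) (hb : pvAget A 0 1 = b)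
    (hc : pvAget A 1 0 = c) (hd : pvAget A 1 1 = d) :
    ∀ (fuel : Nat) (f g k : Int),
      pvLoopA n A fuel
        [[PySem.Int.mod (f * a + g) n, PySem.Int.mod (f * b) n],
         [PySem.Int.mod (f * c) n, PySem.Int.mod (f * d + g) n]] k
      = pvLoopB n a b c d (a + d) (a * d - b * c) fuel f g k := by
  intro fuel
  induction fuel with
  | zero => intro f g k; rfl
  | succ fuel ih =>
    intro f g k
    have hmod : ∀ x : Int, PySem.Int.mod x n = x % n := fun x => PySem.Int.mod_eq_emod_of_pos (a := x) hn
    rw [pvLoopA, pvLoopB]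
    have hcond :
        ([[PySem.Int.mod (f * a + g) n, PySem.Int.mod (f * b) n],
          [PySem.Int.mod (f * c) n, PySem.Int.mod (f * d + g) n]] = [[(1 : Int), 0], [0, 1]])
        ↔ (PySem.Int.mod (f * a + g) n = 1 ∧ PySem.Int.mod (f * b) n = 0 ∧
           PySem.Int.mod (f * c) n = 0 ∧ PySem.Int.mod (f * d + g) n = 1) := by
      constructor
      · intro h; injection h with h1 h2; injection h1 with e1 h1'; injection h1' with e2 _
        injection h2 with h3 _; injection h3 with e3 h3'; injection h3' with e4 _
        exact ⟨e1, e2, e3, e4⟩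
      · rintro ⟨e1, e2, e3, e4⟩; rw [e1, e2, e3, e4]
    by_cases hp : PySem.Int.mod (f * a + g) n = 1 ∧ PySem.Int.mod (f * b) n = 0 ∧
        PySem.Int.mod (f * c) n = 0 ∧ PySem.Int.mod (f * d + g) n = 1
    · rw [if_pos (hcond.mpr hp), if_pos hp]
    · rw [if_neg (fun h => hp (hcond.mp h)), if_neg hp]
      have hstep :
          pvModul (pvMul
            [[PySem.Int.mod (f * a + g) n, PySem.Int.mod (f * b) n],
             [PySem.Int.mod (f * c) n, PySem.Int.mod (f * d + g) n]] A) n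
          = [[PySem.Int.mod (PySem.Int.mod ((a + d) * f + g) n * a + PySem.Int.mod (-(a * d - b * c) * f) n) n,
              PySem.Int.mod (PySem.Int.mod ((a + d) * f + g) n * b) n],
             [PySem.Int.mod (PySem.Int.mod ((a + d) * f + g) n * c) n,
              PySem.Int.mod (PySem.Int.mod ((a + d) * f + g) n * d + PySem.Int.mod (-(a * d - b * c) * f) n) n]] := by
        simp only [pvModul, pvMul, pvAget, List.getD, List.getElem?_cons_zero,
          List.getElem?_cons_succ, Option.getD_some] at *
        rw [ha, hb, hc, hd]
        simp only [hmod]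
        refine congrArg₂ _ (congrArg₂ _ ?_ (congrArg₂ _ ?_ rfl)) (congrArg₂ _ (congrArg₂ _ ?_ (congrArg₂ _ ?_ rfl)) rfl)
        · exact pv_key1 n (f * a + g) (f * b) a c ((a + d) * f + g) a (-(a * d - b * c) * f) (by ring)
        · exact pv_key2 n (f * a + g) (f * b) b d ((a + d) * f + g) b (by ring)
        · exact pv_key2 n (f * c) (f * d + g) a c ((a + d) * f + g) c (by ring)
        · exact pv_key1 n (f * c) (f * d + g) b d ((a + d) * f + g) d (-(a * d - b * c) * f) (by ring)
      rw [hstep]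
      exact ih (PySem.Int.mod ((a + d) * f + g) n) (PySem.Int.mod (-(a * d - b * c) * f) n) (k + 1)

-- ===== VERDICT (by name: the statement is the Claim_ definition above) =====
theorem identiteta_optimal_spec : Claim_equal_identiteta_optimal := by
  intro n A _hDom hPre
  obtain ⟨hn, -, -, -, -⟩ := hPre
  unfold Spec_identiteta_optimal identiteta_optimal identiteta_optimal_alt
  have h := pv_loop_eq n (pvAget A 0 0) (pvAget A 0 1) (pvAget A 1 0) (pvAget A 1 1)
    (by omega) A rfl rfl rfl rfl (n.toNat ^ 4 + 1) 1 0 1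
  simpa [pvModul] using h
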